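-- pv_equiv track=rewrite | github.com/lcipolina/coalitions_RL | benchmarks/q_learning_not_working.py | value_function
-- ===== SOURCE A (Python) =====
-- def value_function(coalition):
--     '''The characteristic function captures the synergy between agents by assigning a higher reward for certain agent combinations
--     (e.g., 1 cooker and 2 helpers yield a "cake" worth 10 points).
--     '''
--     num_cookers = sum(1 for agent in coalition if agent == 'cooker')
--     num_helpers = sum(1 for agent in coalition if agent == 'helper')
--     value = 0
--
--     # Rule (i): 1 cooker and 2 helpers can make a cake worth 10 points
--     while num_cookers >= 1 and num_helpers >= 2:
--         value += 10  # Cake value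
--         num_cookers -= 1  # count the number of cookers
--         num_helpers -= 2  # count the number of helpers
--
--     # Rule (ii): 4 cookers alone can make a cake worth 10 points
--     while num_cookers >= 4:
--         value += 10  # Cake value
--         num_cookers -= 4
--
--     # Rule (iii): A helper alone can make a cookie worth 1 point
--     value += num_helpers  # Each remaining helper can make a cookie
--
--     # Rule (iv): A cooker alone can do nothing (no additional points)
--
--     return value
-- ===== SOURCE B (Python) =====
-- def value_function(coalition):
--     num_cookers = coalition.count('cooker')
--     num_helpers = coalition.count('helper')
--     cakes1 = min(num_cookers, num_helpers // 2)
--     num_cookers -= cakes1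
--     num_helpers -= 2 * cakes1
--     return 10 * (cakes1 + num_cookers // 4) + num_helpers
-- ===== Notes on version B (the rewrite author's own statement) =====
-- stated objective: simpler
-- what changed: Replaces both greedy while-loops with closed-form arithmetic: cakes from rule (i) = min(cookers, helpers//2), rule (ii) cakes = leftover_cookers//4, plus leftover helpers.
import Mathlib
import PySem

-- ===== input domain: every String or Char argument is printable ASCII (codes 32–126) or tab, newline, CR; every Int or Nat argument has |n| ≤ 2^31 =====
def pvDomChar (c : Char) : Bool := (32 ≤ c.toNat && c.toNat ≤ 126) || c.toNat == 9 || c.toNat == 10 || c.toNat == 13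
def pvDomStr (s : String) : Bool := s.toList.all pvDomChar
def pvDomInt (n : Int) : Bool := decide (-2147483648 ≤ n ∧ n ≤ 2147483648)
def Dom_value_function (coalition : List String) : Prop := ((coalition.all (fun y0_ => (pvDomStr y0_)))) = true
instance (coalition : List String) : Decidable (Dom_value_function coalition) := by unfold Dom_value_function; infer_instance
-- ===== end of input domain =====

-- B replaces the two greedy while-loops by closed-form arithmetic (simpler; return value only).
-- ===== PORT A =====
-- while num_cookers >= 1 and num_helpers >= 2: value += 10; num_cookers -= 1; num_helpers -= 2
def vfLoop1 (c h v : Int) : Int × Int × Int :=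
  if c ≥ 1 ∧ h ≥ 2 then vfLoop1 (c - 1) (h - 2) (v + 10) else (c, h, v)
  termination_by h.toNat
  decreasing_by omega

-- while num_cookers >= 4: value += 10; num_cookers -= 4
def vfLoop2 (c v : Int) : Int :=
  if c ≥ 4 then vfLoop2 (c - 4) (v + 10) else v
  termination_by c.toNat
  decreasing_by omega

def value_function (coalition : List String) : Int :=
  let num_cookers : Int := coalition.foldl (fun acc a => if a = "cooker" then acc + 1 else acc) 0
  let num_helpers : Int := coalition.foldl (fun acc a => if a = "helper" then acc + 1 else acc) 0
  let s1 := vfLoop1 num_cookers num_helpers 0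
  let v2 := vfLoop2 s1.1 s1.2.2
  v2 + s1.2.1

-- ===== PORT B =====
def value_function_alt (coalition : List String) : Int :=
  let num_cookers : Int := (coalition.count "cooker" : Nat)
  let num_helpers : Int := (coalition.count "helper" : Nat)
  let cakes1 := min num_cookers (PySem.Int.floordiv num_helpers 2)
  let num_cookers := num_cookers - cakes1
  let num_helpers := num_helpers - 2 * cakes1
  10 * (cakes1 + PySem.Int.floordiv num_cookers 4) + num_helpers

-- ===== PRECONDITION & SPEC =====
def Spec_value_function (coalition : List String) (out : Int) : Prop := out = value_function_alt coalition
instance (coalition : List String) (out : Int) : Decidable (Spec_value_function coalition out) := by unfold Spec_value_function; infer_instance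

-- ===== CLAIM (what is proved, stated in full; the proofs are below) =====
def Claim_equal_value_function : Prop := ∀ (coalition : List String), Dom_value_function coalition → Spec_value_function coalition (value_function coalition)

-- ===== LEMMAS AND PROOFS =====
lemma vf_count_fold (l : List String) (s : String) (acc : Int) :
    l.foldl (fun acc a => if a = s then acc + 1 else acc) acc = acc + l.count s := by
  induction l generalizing acc with
  | nil => simp
  | cons x xs ih =>
    simp only [List.foldl_cons, List.count_cons, ih]
    by_cases hx : x = s
    · simp [hx]; ring
    · simp [hx]

lemma vfLoop1_closed (c h v : Int) (hc : 0 ≤ c) (hh : 0 ≤ h) :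
    vfLoop1 c h v = (c - min c (h / 2), h - 2 * min c (h / 2), v + 10 * min c (h / 2)) := by
  fun_induction vfLoop1 c h v with
  | case1 c h v hcond ih =>
    rw [ih (by omega) (by omega)]
    have h1 : min (c - 1) ((h - 2) / 2) = min c (h / 2) - 1 := by omega
    rw [h1]; refine Prod.ext ?_ (Prod.ext ?_ ?_) <;> simp <;> ring
  | case2 c h v hcond =>
    have : min c (h / 2) = 0 := by omega
    simp [this]

lemma vfLoop2_closed (c v : Int) (hc : 0 ≤ c) : vfLoop2 c v = v + 10 * (c / 4) := by
  fun_induction vfLoop2 c v with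
  | case1 c v hcond ih =>
    rw [ih (by omega)]
    have : (c - 4) / 4 = c / 4 - 1 := by omega
    rw [this]; ring
  | case2 c v hcond =>
    have : c / 4 = 0 := by omega
    simp [this]

-- ===== VERDICT (by name: the statement is the Claim_ definition above) =====
theorem value_function_spec : Claim_equal_value_function := by
  intro coalition _
  unfold Spec_value_function value_function value_function_alt
  simp only [vf_count_fold, zero_add]
  set C : Int := ((coalition.count "cooker" : Nat) : Int) with hC
  set H : Int := ((coalition.count "helper" : Nat) : Int) with hH
  have hc : 0 ≤ C := by positivity
  have hh : 0 ≤ H := by positivity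
  rw [vfLoop1_closed C H 0 hc hh]
  simp only []
  rw [vfLoop2_closed _ _ (by omega)]
  rw [PySem.Int.floordiv_eq_ediv_of_pos (by norm_num),
      PySem.Int.floordiv_eq_ediv_of_pos (by norm_num)]
  ring
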